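-- pv_equiv track=rewrite | github.com/csh970605/BOJ | 백준/Gold/1790. 수 이어 쓰기 2/수 이어 쓰기 2.py | digit_length
-- ===== SOURCE A (Python) =====
-- def digit_length(x):
--     length = 0
--     digit = 1
--     num = 9
--     while x > num:
--         length += num * digit
--         x -= num
--         digit += 1
--         num *= 10
--     length += x * digit
--     return length
-- ===== SOURCE B (Python) =====
-- def digit_length(x):
--     # closed form: find d = digit count of x (d=1 for x<=0), then (x+1)*d - (10**d - 1)//9
--     d = 1
--     p = 10  # invariant: p == 10**d
--     while x > p - 1:
--         d += 1
--         p *= 10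
--     return (x + 1) * d - (p - 1) // 9
-- ===== Notes on version B (the rewrite author's own statement) =====
-- stated objective: simpler
-- what changed: Replaces the accumulation loop (summing num*digit per digit-length group while mutating x) with a short loop that only finds the digit count d and a single closed-form expression (x+1)*d - (10**d-1)//9.
import Mathlib
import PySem

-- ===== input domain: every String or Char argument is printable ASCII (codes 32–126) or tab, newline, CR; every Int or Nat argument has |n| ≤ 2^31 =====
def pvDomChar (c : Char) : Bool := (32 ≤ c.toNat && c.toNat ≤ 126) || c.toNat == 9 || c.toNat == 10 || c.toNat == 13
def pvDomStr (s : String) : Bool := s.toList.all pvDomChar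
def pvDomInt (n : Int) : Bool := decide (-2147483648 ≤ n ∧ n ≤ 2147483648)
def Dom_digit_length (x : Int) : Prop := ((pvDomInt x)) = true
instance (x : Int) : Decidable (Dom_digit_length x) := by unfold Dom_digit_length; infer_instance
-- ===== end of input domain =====

-- B replaces A's per-digit-group accumulation loop with a digit-count loop plus the closed form (x+1)*d - (10**d-1)//9 (simpler).


-- ===== PORT A =====
-- A's while loop: state (x, length, digit, num); num stays positive (9, 90, 900, …)
def digitLoopA (x length digit num : Int) (h : 0 < num) : Int :=
  if hx : x > num then
    digitLoopA (x - num) (length + num * digit) (digit + 1) (num * 10) (by omega)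
  else
    length + x * digit
termination_by x.toNat
decreasing_by omega

def digit_length (x : Int) : Int := digitLoopA x 0 1 9 (by omega)

-- ===== PORT B =====
-- B's while loop: state (d, p) with p = 10**d kept alongside; p stays positive; at exit
-- the return expression (x+1)*d - (p-1)//9 of Source B.
def digitLoopB (x d p : Int) (h : 0 < p) : Int :=
  if hx : x > p - 1 then
    digitLoopB x (d + 1) (p * 10) (by omega)
  else
    (x + 1) * d - PySem.Int.floordiv (p - 1) 9
termination_by (x + 1 - p).toNat
decreasing_by omega

def digit_length_alt (x : Int) : Int := digitLoopB x 1 10 (by omega)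

-- ===== PRECONDITION & SPEC =====
def Spec_digit_length (x : Int) (out : Int) : Prop := out = digit_length_alt x
instance (x : Int) (out : Int) : Decidable (Spec_digit_length x out) := by unfold Spec_digit_length; infer_instance

-- ===== CLAIM (what is proved, stated in full; the proofs are below) =====
def Claim_equal_digit_length : Prop := ∀ (x : Int), Dom_digit_length x → Spec_digit_length x (digit_length x)

-- ===== LEMMAS AND PROOFS =====

-- repunit: R k = (10^k - 1)/9
def repuR : Nat → Int
  | 0 => 0
  | k + 1 => 10 * repuR k + 1

lemma nine_repuR (k : Nat) : 9 * repuR k = 10 ^ k - 1 := by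
  induction k with
  | zero => simp [repuR]
  | succ n ih => simp only [repuR, pow_succ]; ring_nf; ring_nf at ih; omega

lemma floordiv_repuR (k : Nat) :
    PySem.Int.floordiv ((10 : Int) ^ k - 1) 9 = repuR k := by
  rw [← nine_repuR k, PySem.Int.floordiv_eq_ediv_of_pos (by omega)]
  exact Int.mul_ediv_cancel_left _ (by omega)

lemma key (m : Nat) : ∀ (k : Nat) (x : Int), x ≤ 10 ^ (k + 1 + m) - 1 →
    digitLoopA (x - ((10 : Int) ^ k - 1)) ((10 : Int) ^ k * (k + 1) - repuR (k + 1))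
      ((k : Int) + 1) (9 * 10 ^ k) (by positivity)
    = digitLoopB x ((k : Int) + 1) ((10 : Int) ^ (k + 1)) (by positivity) := by
  induction m with
  | zero =>
    intro k x hx
    have hx' : x ≤ 10 ^ (k + 1) - 1 := by simpa using hx
    have hcond : ¬ (x - ((10 : Int) ^ k - 1) > 9 * 10 ^ k) := by
      have : (10 : Int) ^ (k + 1) = 10 ^ k * 10 := pow_succ 10 k
      omega
    have hcondB : ¬ (x > (10 : Int) ^ (k + 1) - 1) := by omega
    rw [digitLoopA, dif_neg hcond, digitLoopB, dif_neg hcondB, floordiv_repuR]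
    ring
  | succ n ih =>
    intro k x hx
    by_cases hgt : x > (10 : Int) ^ (k + 1) - 1
    · have hcond : x - ((10 : Int) ^ k - 1) > 9 * 10 ^ k := by
        have : (10 : Int) ^ (k + 1) = 10 ^ k * 10 := pow_succ 10 k
        omega
      rw [digitLoopA, dif_pos hcond, digitLoopB, dif_pos hgt]
      have harg1 : x - ((10 : Int) ^ k - 1) - 9 * 10 ^ k = x - ((10 : Int) ^ (k + 1) - 1) := by
        have : (10 : Int) ^ (k + 1) = 10 ^ k * 10 := pow_succ 10 k
        omega
      have harg2 : (10 : Int) ^ k * (↑k + 1) - repuR (k + 1) + 9 * 10 ^ k * (↑k + 1)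
          = (10 : Int) ^ (k + 1) * (↑(k + 1) + 1) - repuR (k + 1 + 1) := by
        have h9 := nine_repuR (k + 1)
        have hp : (10 : Int) ^ (k + 1) = 10 ^ k * 10 := pow_succ 10 k
        simp only [repuR] at *
        push_cast
        ring_nf
        ring_nf at h9 hp
        omega
      have harg3 : (9 : Int) * 10 ^ k * 10 = 9 * 10 ^ (k + 1) := by ring
      have harg4 : ((k : Int) + 1) + 1 = ((k + 1 : Nat) : Int) + 1 := by push_cast; ring
      have harg5 : (10 : Int) ^ (k + 1) * 10 = 10 ^ (k + 1 + 1) := by ring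
      have hbound : x ≤ 10 ^ (k + 1 + 1 + n) - 1 := by
        have : (k + 1 + 1 + n) = (k + 1 + (n + 1)) := by omega
        rw [this]; exact hx
      have := ih (k + 1) x hbound
      simp only [harg1, harg2, harg3, harg4, harg5]
      convert this using 2
    · have hcond : ¬ (x - ((10 : Int) ^ k - 1) > 9 * 10 ^ k) := by
        have : (10 : Int) ^ (k + 1) = 10 ^ k * 10 := pow_succ 10 k
        omega
      rw [digitLoopA, dif_neg hcond, digitLoopB, dif_neg hgt, floordiv_repuR]
      ring

lemma x_le_pow (x : Int) : x ≤ 10 ^ (1 + x.toNat) - 1 := by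
  have h : (x.toNat : Int) < (10 : Int) ^ x.toNat := by
    exact_mod_cast Nat.lt_pow_self (by norm_num) (n := x.toNat)
  have h2 : (10 : Int) ^ x.toNat ≤ 10 ^ (1 + x.toNat) := by
    apply pow_le_pow_right₀ (by norm_num); omega
  rcases le_or_gt x 0 with hx | hx
  · have : (0 : Int) < 10 ^ (1 + x.toNat) := by positivity
    omega
  · have : (x.toNat : Int) = x := Int.toNat_of_nonneg (by omega)
    omega

-- ===== VERDICT (by name: the statement is the Claim_ definition above) =====
theorem digit_length_spec : Claim_equal_digit_length := by
  intro x _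
  unfold Spec_digit_length digit_length digit_length_alt
  have := key x.toNat 0 x (by simpa using x_le_pow x)
  simpa using this
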